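-- pv_equiv track=rewrite | github.com/RobertPaulig/geometric_table_preprint_project | code/scripts/wave_metrics.py | diag_hits
-- ===== SOURCE A (Python) =====
-- from typing import Iterable, List, Tuple
--
-- def diag_hits(N0: int, K: int) -> Tuple[List[int], int]:
--     hits = [k for k in range(1, K + 1) if N0 % k == 0]
--     run_len = 0
--     cur = 0
--     prev = None
--     for k in hits:
--         if prev is None or k == prev + 1:
--             cur += 1
--         else:
--             run_len = max(run_len, cur)
--             cur = 1
--         prev = k
--     run_len = max(run_len, cur)
--     return hits, run_len
-- ===== SOURCE B (Python) =====
-- from typing import List, Tuple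
--
-- def diag_hits(N0: int, K: int) -> Tuple[List[int], int]:
--     n = abs(N0)
--     if n == 0:
--         hits = list(range(1, K + 1))
--         return hits, len(hits)
--     divs = set()
--     i = 1
--     while i * i <= n:
--         if n % i == 0:
--             divs.add(i)
--             divs.add(n // i)
--         i += 1
--     hits = sorted(d for d in divs if d <= K)
--     best = 0
--     cur = 0
--     nxt = None
--     for x in reversed(hits):
--         cur = cur + 1 if nxt == x + 1 else 1
--         nxt = x
--         best = max(best, cur)
--     return hits, best
-- ===== Notes on version B (the rewrite author's own statement) =====
-- stated objective: faster
-- what changed: B enumerates divisors by trial division up to sqrt(|N0|) (collecting i and N0//i into a set, then sorting and filtering <= K) instead of testing every k in 1..K, special-cases N0 = 0 as the full range, and computes the longest consecutive run by a backward pass instead of A's forward prev/cur fold.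
import Mathlib
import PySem

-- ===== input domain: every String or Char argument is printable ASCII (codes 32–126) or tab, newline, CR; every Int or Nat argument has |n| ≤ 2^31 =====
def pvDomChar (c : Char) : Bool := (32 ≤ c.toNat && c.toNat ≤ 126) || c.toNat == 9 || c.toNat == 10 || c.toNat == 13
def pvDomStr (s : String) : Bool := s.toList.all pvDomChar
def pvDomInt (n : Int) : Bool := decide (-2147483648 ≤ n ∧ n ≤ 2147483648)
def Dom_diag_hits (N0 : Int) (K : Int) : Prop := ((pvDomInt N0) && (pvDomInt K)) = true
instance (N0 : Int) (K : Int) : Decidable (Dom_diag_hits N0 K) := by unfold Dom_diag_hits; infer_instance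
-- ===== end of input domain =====

-- B enumerates divisors via trial division up to sqrt(|N0|) (set + sort + filter <= K) instead of
-- scanning all of 1..K, and finds the longest consecutive run by a backward pass (objective: faster).


-- ===== PORT A =====
def diag_hits (N0 : Int) (K : Int) : List Int × Int :=
  let hits := (PySem.List.pyRange 1 (K + 1) 1).filter (fun k => PySem.Int.mod N0 k == 0)
  let st := hits.foldl
    (fun (st : Int × Int × Option Int) k =>
      match st.2.2 with
      | none => (st.1, st.2.1 + 1, some k)
      | some p => if k = p + 1 then (st.1, st.2.1 + 1, some k)
                  else (max st.1 st.2.1, 1, some k))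
    (0, 0, none)
  (hits, max st.1 st.2.1)

-- ===== PORT B =====
-- the `while i*i <= n` trial-division loop of Source B (i, n kept as Nat: both are nonnegative Python ints)
def pvCollectDivs (n : Nat) (i : Nat) (acc : PySem.Set Int) : PySem.Set Int :=
  if i * i ≤ n then
    pvCollectDivs n (i + 1)
      (if n % i == 0 then PySem.Set.add (PySem.Set.add acc (i : Int)) ((n / i : Nat) : Int) else acc)
  else acc
termination_by n + 1 - i
decreasing_by
  rename_i h
  rcases Nat.eq_zero_or_pos i with hi | hi
  · omega
  · have : i ≤ i * i := Nat.le_mul_of_pos_left i hi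
    omega

-- the `for x in reversed(hits)` backward run scan of Source B
def pvRunLoop (hits : List Int) : Int :=
  (hits.reverse.foldl
    (fun (st : Int × Int × Option Int) x =>
      let cur := if st.2.2 = some (x + 1) then st.2.1 + 1 else 1
      (max st.1 cur, cur, some x))
    (0, 0, none)).1

def diag_hits_alt (N0 : Int) (K : Int) : List Int × Int :=
  let n := N0.natAbs
  if n = 0 then
    let hits := PySem.List.pyRange 1 (K + 1) 1
    (hits, (hits.length : Int))
  else
    let hits := PySem.List.sorted
      ((pvCollectDivs n 1 PySem.Set.empty).filter (fun d => decide (d ≤ K))) (fun x => x) false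
    (hits, pvRunLoop hits)

-- ===== PRECONDITION & SPEC =====
def Spec_diag_hits (N0 : Int) (K : Int) (out : List Int × Int) : Prop := out = diag_hits_alt N0 K
instance (N0 : Int) (K : Int) (out : List Int × Int) : Decidable (Spec_diag_hits N0 K out) := by unfold Spec_diag_hits; infer_instance

-- ===== CLAIM (what is proved, stated in full; the proofs are below) =====
def Claim_equal_diag_hits : Prop := ∀ (N0 : Int) (K : Int), Dom_diag_hits N0 K → Spec_diag_hits N0 K (diag_hits N0 K)

-- ===== LEMMAS AND PROOFS =====

def pvG (xs : List Int) : Int × Int × Option Int :=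
  xs.foldr (fun x st =>
    let cur := if st.2.2 = some (x + 1) then st.2.1 + 1 else 1
    (max st.1 cur, cur, some x)) (0, 0, none)

lemma pvRunLoop_eq_pvG (xs : List Int) : pvRunLoop xs = (pvG xs).1 := by
  simp [pvRunLoop, pvG, List.foldl_reverse]

lemma pvG_head (xs : List Int) : (pvG xs).2.2 = xs.head? := by
  cases xs <;> rfl

lemma pvG_bounds (xs : List Int) :
    0 ≤ (pvG xs).2.1 ∧ (pvG xs).2.1 ≤ (pvG xs).1 ∧ (xs ≠ [] → 1 ≤ (pvG xs).2.1) := by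
  induction xs with
  | nil => simp [pvG]
  | cons x t ih =>
    simp only [pvG, List.foldr_cons] at *
    split_ifs <;> simp_all <;> omega

def pvStepA (st : Int × Int × Option Int) (k : Int) : Int × Int × Option Int :=
  match st.2.2 with
  | none => (st.1, st.2.1 + 1, some k)
  | some p => if k = p + 1 then (st.1, st.2.1 + 1, some k)
              else (max st.1 st.2.1, 1, some k)

lemma pvFoldA_eq (t : List Int) : ∀ (x r c : Int), 0 ≤ r → 0 ≤ c →
    (max (t.foldl pvStepA (r, c, some x)).1 (t.foldl pvStepA (r, c, some x)).2.1) =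
    (match t with
     | [] => max r c
     | y :: _ => if y = x + 1 then max r (max (c + (pvG t).2.1) (pvG t).1)
                 else max r (max c (pvG t).1)) := by
  induction t with
  | nil => intro x r c hr hc; simp
  | cons k t2 ih =>
    intro x r c hr hc
    simp only [List.foldl_cons]
    have hstep : pvStepA (r, c, some x) k =
        if k = x + 1 then (r, c + 1, some k) else (max r c, 1, some k) := rfl
    have hb := pvG_bounds t2
    have hh := pvG_head t2
    by_cases hk : k = x + 1
    · rw [hstep, if_pos hk]
      rw [ih k r (c + 1) hr (by omega)]
      cases t2 with
      | nil => simp [pvG]; omega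
      | cons y2 t3 =>
        have hG : pvG (k :: y2 :: t3) =
            (max (pvG (y2 :: t3)).1 (if (pvG (y2 :: t3)).2.2 = some (k + 1) then (pvG (y2 :: t3)).2.1 + 1 else 1),
             (if (pvG (y2 :: t3)).2.2 = some (k + 1) then (pvG (y2 :: t3)).2.1 + 1 else 1), some k) := rfl
        simp only [List.head?_cons] at hh
        simp only [if_pos hk, hG, hh, Option.some.injEq]
        by_cases hy : y2 = k + 1
        · simp only [if_pos hy]; omega
        · simp only [if_neg hy]
          have := hb.2.2 (by simp)
          omega
    · rw [hstep, if_neg hk]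
      rw [ih k (max r c) 1 (by omega) (by omega)]
      cases t2 with
      | nil => simp [pvG]; omega
      | cons y2 t3 =>
        have hG : pvG (k :: y2 :: t3) =
            (max (pvG (y2 :: t3)).1 (if (pvG (y2 :: t3)).2.2 = some (k + 1) then (pvG (y2 :: t3)).2.1 + 1 else 1),
             (if (pvG (y2 :: t3)).2.2 = some (k + 1) then (pvG (y2 :: t3)).2.1 + 1 else 1), some k) := rfl
        simp only [List.head?_cons] at hh
        simp only [if_neg hk, hG, hh, Option.some.injEq]
        by_cases hy : y2 = k + 1
        · simp only [if_pos hy]; omega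
        · simp only [if_neg hy]; omega

lemma pvRunA_eq_pvG (xs : List Int) :
    max (xs.foldl pvStepA (0, 0, none)).1 (xs.foldl pvStepA (0, 0, none)).2.1 = (pvG xs).1 := by
  cases xs with
  | nil => rfl
  | cons k t =>
    have h0 : pvStepA (0, 0, none) k = (0, 1, some k) := rfl
    simp only [List.foldl_cons, h0]
    rw [pvFoldA_eq t k 0 1 (by omega) (by omega)]
    have hb := pvG_bounds t
    have hh := pvG_head t
    cases t with
    | nil => simp [pvG]
    | cons y2 t3 =>
      have hG : pvG (k :: y2 :: t3) =
          (max (pvG (y2 :: t3)).1 (if (pvG (y2 :: t3)).2.2 = some (k + 1) then (pvG (y2 :: t3)).2.1 + 1 else 1),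
           (if (pvG (y2 :: t3)).2.2 = some (k + 1) then (pvG (y2 :: t3)).2.1 + 1 else 1), some k) := rfl
      simp only [List.head?_cons] at hh
      simp only [hG, hh, Option.some.injEq]
      by_cases hy : y2 = k + 1
      · simp only [if_pos hy]; omega
      · simp only [if_neg hy]
        have := hb.2.2 (by simp)
        omega

lemma pvG_chain (xs : List Int) (h : List.IsChain (fun a b : Int => b = a + 1) xs) :
    (pvG xs).2.1 = (xs.length : Int) ∧ (pvG xs).1 = (xs.length : Int) := by
  induction xs with
  | nil => simp [pvG]
  | cons x t ih =>
    cases t with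
    | nil => simp [pvG]
    | cons y t2 =>
      obtain ⟨hy, h2⟩ := List.isChain_cons_cons.mp h
      have hih := ih h2
      have hh := pvG_head (y :: t2)
      have hG : pvG (x :: y :: t2) =
          (max (pvG (y :: t2)).1 (if (pvG (y :: t2)).2.2 = some (x + 1) then (pvG (y :: t2)).2.1 + 1 else 1),
           (if (pvG (y :: t2)).2.2 = some (x + 1) then (pvG (y :: t2)).2.1 + 1 else 1), some x) := rfl
      simp only [List.head?_cons] at hh
      simp only [hG, hh, Option.some.injEq, if_pos hy]
      simp only [List.length_cons] at *
      push_cast at *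
      omega

lemma pvChain_pyRange (b : Int) : ∀ (n : Nat) (a : Int), (b - a).toNat = n →
    List.IsChain (fun p q : Int => q = p + 1) (PySem.List.pyRange a b 1) := by
  intro n
  induction n with
  | zero =>
    intro a ha
    rw [PySem.List.pyRange_one_eq_nil (by omega)]
    exact List.isChain_nil
  | succ m ih =>
    intro a ha
    rw [PySem.List.pyRange_one_cons (by omega)]
    apply List.IsChain.cons (ih (a + 1) (by omega))
    intro y hy
    by_cases h2 : a + 1 < b
    · rw [PySem.List.pyRange_one_cons h2] at hy
      simp only [List.head?_cons, Option.mem_def, Option.some.injEq] at hy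
      omega
    · rw [PySem.List.pyRange_one_eq_nil (by omega)] at hy
      simp at hy

lemma pvCollectDivs_mem (n i : Nat) (acc : PySem.Set Int) (d : Int) :
    d ∈ pvCollectDivs n i acc ↔
      d ∈ acc ∨ ∃ j : Nat, i ≤ j ∧ j * j ≤ n ∧ n % j = 0 ∧
        (d = (j : Int) ∨ d = ((n / j : Nat) : Int)) := by
  induction i, acc using pvCollectDivs.induct (n := n) with
  | case1 i acc h ih =>
    simp only [dite_eq_ite] at ih
    rw [pvCollectDivs, if_pos h, ih]
    by_cases hm : n % i = 0
    · simp only [hm, beq_self_eq_true, if_pos]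
      simp only [PySem.Set.mem_add]
      constructor
      · rintro (((hd | hd) | hd) | ⟨j, hj1, hj2, hj3, hj4⟩)
        · exact Or.inl hd
        · exact Or.inr ⟨i, le_refl i, h, hm, Or.inl hd⟩
        · exact Or.inr ⟨i, le_refl i, h, hm, Or.inr hd⟩
        · exact Or.inr ⟨j, by omega, hj2, hj3, hj4⟩
      · rintro (hd | ⟨j, hj1, hj2, hj3, hj4⟩)
        · exact Or.inl (Or.inl (Or.inl hd))
        · by_cases hji : j = i
          · subst hji
            rcases hj4 with hd | hd
            · exact Or.inl (Or.inl (Or.inr hd))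
            · exact Or.inl (Or.inr hd)
          · exact Or.inr ⟨j, by omega, hj2, hj3, hj4⟩
    · have : (n % i == 0) = false := by simp [hm]
      rw [this, if_neg (by simp)]
      constructor
      · rintro (hd | ⟨j, hj1, hj2, hj3, hj4⟩)
        · exact Or.inl hd
        · exact Or.inr ⟨j, by omega, hj2, hj3, hj4⟩
      · rintro (hd | ⟨j, hj1, hj2, hj3, hj4⟩)
        · exact Or.inl hd
        · refine Or.inr ⟨j, ?_, hj2, hj3, hj4⟩
          rcases Nat.eq_or_lt_of_le hj1 with he | hl
          · exact absurd (he ▸ hj3) hm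
          · omega
  | case2 i acc h =>
    rw [pvCollectDivs, if_neg h]
    constructor
    · exact Or.inl
    · rintro (hd | ⟨j, hj1, hj2, hj3, hj4⟩)
      · exact hd
      · exact absurd hj2 (by
          have : i * i ≤ j * j := Nat.mul_le_mul hj1 hj1
          omega)

lemma pvCollectDivs_nodup (n i : Nat) (acc : PySem.Set Int) (h : acc.Nodup) :
    (pvCollectDivs n i acc).Nodup := by
  induction i, acc using pvCollectDivs.induct (n := n) with
  | case1 i acc hle ih =>
    simp only [dite_eq_ite] at ih
    rw [pvCollectDivs, if_pos hle]
    apply ih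
    split_ifs
    · exact PySem.Set.nodup_add _ _ (PySem.Set.nodup_add _ _ h)
    · exact h
  | case2 i acc hle =>
    rw [pvCollectDivs, if_neg hle]
    exact h

lemma pvDivs_char (n : Nat) (hn : 0 < n) (d : Int) :
    d ∈ pvCollectDivs n 1 PySem.Set.empty ↔ 1 ≤ d ∧ d ∣ (n : Int) := by
  rw [pvCollectDivs_mem]
  simp only [PySem.Set.empty, List.not_mem_nil, false_or]
  constructor
  · rintro ⟨j, hj1, hj2, hj3, hd | hd⟩
    · have hdvd : j ∣ n := Nat.dvd_of_mod_eq_zero hj3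
      subst hd
      exact ⟨by exact_mod_cast hj1, Int.natCast_dvd_natCast.mpr hdvd⟩
    · have hdvd : j ∣ n := Nat.dvd_of_mod_eq_zero hj3
      have hjn : j ≤ n := le_trans (Nat.le_mul_of_pos_left j hj1) hj2
      have hpos : 0 < n / j := Nat.div_pos hjn hj1
      subst hd
      exact ⟨by exact_mod_cast hpos, Int.natCast_dvd_natCast.mpr (Nat.div_dvd_of_dvd hdvd)⟩
  · rintro ⟨hd1, hd2⟩
    obtain ⟨m, hm⟩ : ∃ m : Nat, d = (m : Int) := ⟨d.toNat, by omega⟩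
    subst hm
    have hm1 : 1 ≤ m := by exact_mod_cast hd1
    have hmd : m ∣ n := Int.natCast_dvd_natCast.mp hd2
    by_cases hsq : m * m ≤ n
    · exact ⟨m, hm1, hsq, Nat.mod_eq_zero_of_dvd hmd, Or.inl rfl⟩
    · refine ⟨n / m, ?_, ?_, ?_, Or.inr ?_⟩
      · have : m ≤ n := Nat.le_of_dvd hn hmd
        exact Nat.div_pos this hm1
      · have hmul : n / m * m = n := Nat.div_mul_cancel hmd
        have hle : n / m ≤ m := by nlinarith
        calc n / m * (n / m) ≤ n / m * m := Nat.mul_le_mul_left _ hle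
          _ = n := hmul
      · exact Nat.mod_eq_zero_of_dvd (Nat.div_dvd_of_dvd hmd)
      · rw [Nat.div_div_self hmd (by omega)]

lemma pvHits_eq (N0 K : Int) (hn : N0.natAbs ≠ 0) :
    PySem.List.sorted
      ((pvCollectDivs N0.natAbs 1 PySem.Set.empty).filter (fun d => decide (d ≤ K))) (fun x => x) false =
    (PySem.List.pyRange 1 (K + 1) 1).filter (fun k => PySem.Int.mod N0 k == 0) := by
  have hpa : ((PySem.List.pyRange 1 (K + 1) 1).filter (fun k => PySem.Int.mod N0 k == 0)).Pairwise (· < ·) :=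
    (PySem.List.pairwise_lt_pyRange_one 1 (K + 1)).filter _
  have hna : ((PySem.List.pyRange 1 (K + 1) 1).filter (fun k => PySem.Int.mod N0 k == 0)).Nodup :=
    hpa.nodup
  have hnb : ((pvCollectDivs N0.natAbs 1 PySem.Set.empty).filter (fun d => decide (d ≤ K))).Nodup :=
    (pvCollectDivs_nodup _ _ _ List.nodup_nil).filter _
  apply PySem.List.sorted_eq_of_perm_of_pairwise_lt
  · apply (List.perm_ext_iff_of_nodup hna hnb).mpr
    intro a
    simp only [List.mem_filter, PySem.List.mem_pyRange_one, decide_eq_true_eq, beq_iff_eq]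
    rw [PySem.Int.mod_eq_zero_iff_dvd, pvDivs_char _ (Nat.pos_of_ne_zero hn), Int.dvd_natAbs]
    constructor
    · rintro ⟨⟨h1, h2⟩, h3⟩; exact ⟨⟨h1, h3⟩, by omega⟩
    · rintro ⟨⟨h1, h3⟩, h2⟩; exact ⟨⟨h1, by omega⟩, h3⟩
  · exact hpa

lemma diag_hits_eq (N0 K : Int) :
    diag_hits N0 K =
      ((PySem.List.pyRange 1 (K + 1) 1).filter (fun k => PySem.Int.mod N0 k == 0),
       max (((PySem.List.pyRange 1 (K + 1) 1).filter (fun k => PySem.Int.mod N0 k == 0)).foldl pvStepA (0, 0, none)).1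
           (((PySem.List.pyRange 1 (K + 1) 1).filter (fun k => PySem.Int.mod N0 k == 0)).foldl pvStepA (0, 0, none)).2.1) := rfl


-- ===== VERDICT (by name: the statement is the Claim_ definition above) =====
theorem diag_hits_spec : Claim_equal_diag_hits := by
  intro N0 K _
  unfold Spec_diag_hits
  rw [diag_hits_eq]
  simp only [diag_hits_alt]
  by_cases h0 : N0.natAbs = 0
  · rw [if_pos h0]
    have hN0 : N0 = 0 := Int.natAbs_eq_zero.mp h0
    have hf : (PySem.List.pyRange 1 (K + 1) 1).filter (fun k => PySem.Int.mod N0 k == 0) =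
        PySem.List.pyRange 1 (K + 1) 1 := by
      apply List.filter_eq_self.mpr
      intro k _
      simp [PySem.Int.mod_eq_zero_iff_dvd, hN0]
    rw [hf]
    simp only [Prod.mk.injEq]
    refine ⟨trivial, ?_⟩
    rw [pvRunA_eq_pvG]
    exact (pvG_chain _ (pvChain_pyRange (K + 1) ((K + 1) - 1).toNat 1 rfl)).2
  · rw [if_neg h0, ← pvHits_eq N0 K h0]
    simp only [Prod.mk.injEq]
    refine ⟨trivial, ?_⟩
    rw [pvRunA_eq_pvG, pvRunLoop_eq_pvG]
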